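-- pv_equiv track=rewrite | github.com/AshishHoodaIITD/competitive_coding | Codeforces/cdf650/d.py | process_array
-- ===== SOURCE A (Python) =====
-- def process_array(b):
--     partial_sum = [0 for i in range(len(b))]
--     placement = [0 for i in range(len(b))]
--     for i in range(len(b)):
--         matches = [j for j in range(len(b)) if b[j]==partial_sum[j]]
--         if len(matches)==0:
--             break
--         for m in matches:
--             partial_sum[m] = -1
--             placement[m] = i
--         for j in range(len(b)):
--             if partial_sum[j]>=0:
--                 for m in matches:
--                     partial_sum[j] += abs(j-m)
--     return placement
-- ===== SOURCE B (Python) =====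
-- def process_array(b):
--     n = len(b)
--     placement = [0] * n
--     placed = []
--     for i in range(n):
--         matches = [j for j in range(n)
--                    if j not in placed and b[j] == sum(abs(j - m) for m in placed)]
--         if not matches:
--             break
--         for j in matches:
--             placement[j] = i
--         placed.extend(matches)
--     return placement
-- ===== Notes on version B (the rewrite author's own statement) =====
-- stated objective: alternative
-- what changed: B drops A's incrementally mutated partial_sum array with -1 sentinels and instead keeps a list of already-placed indices, recomputing each unplaced index's distance sum from scratch every round.
import Mathlib
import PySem

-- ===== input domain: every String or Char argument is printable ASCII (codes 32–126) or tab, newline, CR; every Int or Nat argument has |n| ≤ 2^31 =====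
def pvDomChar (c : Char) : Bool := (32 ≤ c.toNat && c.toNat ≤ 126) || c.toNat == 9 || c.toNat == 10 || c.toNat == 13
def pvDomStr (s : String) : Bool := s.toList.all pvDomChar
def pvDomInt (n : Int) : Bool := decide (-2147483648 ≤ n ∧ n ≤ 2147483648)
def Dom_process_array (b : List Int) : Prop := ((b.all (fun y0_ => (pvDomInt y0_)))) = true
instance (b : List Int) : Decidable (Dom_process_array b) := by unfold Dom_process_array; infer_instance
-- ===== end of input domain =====

-- B replaces A's incrementally mutated partial_sum array (with -1 sentinels) by a list of
-- placed indices whose distance sums are recomputed from scratch each round (objective: alternative).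

-- ===== PORT A =====
-- abs(j - m) for Nat indices j m, as Python's int abs
def pvAbs (j m : Nat) : Int := |(j : Int) - (m : Int)|

def processA_loop (b : List Int) (fuel i : Nat) (ps pl : List Int) : List Int :=
  match fuel with
  | 0 => pl
  | Nat.succ fuel' =>
    let n := b.length
    let ms := (List.range n).filter (fun j => b.getD j 0 == ps.getD j 0)
    if ms.isEmpty then pl
    else
      let ps1 := ms.foldl (fun ps m => ps.set m (-1)) ps
      let pl1 := ms.foldl (fun pl m => pl.set m (i : Int)) pl
      let ps2 := (List.range n).foldl (fun ps j =>
        if 0 ≤ ps.getD j 0 then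
          ms.foldl (fun ps m => ps.set j (ps.getD j 0 + pvAbs j m)) ps
        else ps) ps1
      processA_loop b fuel' (i + 1) ps2 pl1

def process_array (b : List Int) : List Int :=
  processA_loop b b.length 0
    ((List.range b.length).map (fun _ => 0))
    ((List.range b.length).map (fun _ => 0))

-- ===== PORT B =====
-- sum(abs(j - m) for m in placed)
def sumDist (placed : List Nat) (j : Nat) : Int :=
  placed.foldl (fun a m => a + pvAbs j m) 0

def processB_loop (b : List Int) (fuel i : Nat) (placed : List Nat) (pl : List Int) : List Int :=
  match fuel with
  | 0 => pl
  | Nat.succ fuel' =>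
    let n := b.length
    let ms := (List.range n).filter
      (fun j => !placed.contains j && (b.getD j 0 == sumDist placed j))
    if ms.isEmpty then pl
    else
      let pl1 := ms.foldl (fun pl j => pl.set j (i : Int)) pl
      processB_loop b fuel' (i + 1) (placed ++ ms) pl1

def process_array_alt (b : List Int) : List Int :=
  processB_loop b b.length 0 [] ((List.range b.length).map (fun _ => 0))

-- ===== PRECONDITION & SPEC =====
def Spec_process_array (b : List Int) (out : List Int) : Prop := out = process_array_alt b
instance (b : List Int) (out : List Int) : Decidable (Spec_process_array b out) := by unfold Spec_process_array; infer_instance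

-- ===== CLAIM (what is proved, stated in full; the proofs are below) =====
def Claim_equal_process_array : Prop := ∀ (b : List Int), Dom_process_array b → Spec_process_array b (process_array b)

-- ===== LEMMAS AND PROOFS =====

-- invariant linking A's partial_sum array with B's placed list
def pvInv (b ps : List Int) (placed : List Nat) : Prop :=
  ps.length = b.length ∧
  (∀ m ∈ placed, m < b.length ∧ 0 ≤ b.getD m 0) ∧
  (∀ j, j < b.length →
    ps.getD j 0 = if j ∈ placed then -1 else sumDist placed j)

lemma sumDist_eq_sum (placed : List Nat) (j : Nat) :
    sumDist placed j = (placed.map (pvAbs j)).sum := by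
  have h := PySem.List.foldl_add (l := placed) (g := pvAbs j) (a := 0)
  simpa [sumDist] using h

lemma sumDist_nonneg (placed : List Nat) (j : Nat) : 0 ≤ sumDist placed j := by
  rw [sumDist_eq_sum]
  apply List.sum_nonneg
  intro x hx
  rcases List.mem_map.1 hx with ⟨m, _, rfl⟩
  exact abs_nonneg _

lemma sumDist_append (placed ms : List Nat) (j : Nat) :
    sumDist (placed ++ ms) j = sumDist placed j + (ms.map (pvAbs j)).sum := by
  simp [sumDist_eq_sum]

lemma getD_set (l : List Int) (m j : Nat) (v : Int) :
    (l.set m v).getD j 0 = if m = j ∧ m < l.length then v else l.getD j 0 := by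
  by_cases h : m = j ∧ m < l.length
  · rcases h with ⟨rfl, hlt⟩
    simp [List.getD_eq_getElem?_getD, hlt]
  · rw [List.getD_eq_getElem?_getD, List.getD_eq_getElem?_getD, List.getElem?_set]
    by_cases hm : m = j
    · subst hm
      have hlt : ¬ m < l.length := fun hc => h ⟨rfl, hc⟩
      simp [hlt]
    · simp [hm]

lemma getD_foldl_set_neg (ms : List Nat) (l : List Int) (j : Nat) :
    (ms.foldl (fun ps m => ps.set m (-1)) l).getD j 0 =
      if j ∈ ms ∧ j < l.length then -1 else l.getD j 0 := by
  induction ms generalizing l with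
  | nil => simp
  | cons m ms ih =>
    rw [List.foldl_cons, ih]
    simp only [List.length_set, List.mem_cons]
    rw [getD_set]
    by_cases hlt : j < l.length
    · by_cases hj : j ∈ ms
      · simp [hj, hlt]
      · by_cases hm : m = j
        · subst hm; simp [hj, hlt]
        · have : ¬ (j = m) := fun h => hm h.symm
          simp [hj, hm, this, hlt]
    · have hm' : ¬ (m = j ∧ m < l.length) := by
        rintro ⟨rfl, h⟩; exact hlt h
      simp [hlt, hm']

-- the innermost 'partial_sum[j] += abs(j-m)' loop is one set of the accumulated sum
lemma foldl_set_same (ms : List Nat) (l : List Int) (j : Nat) :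
    ms.foldl (fun ps m => ps.set j (ps.getD j 0 + pvAbs j m)) l =
      l.set j (l.getD j 0 + (ms.map (pvAbs j)).sum) := by
  induction ms generalizing l with
  | nil =>
    by_cases h : j < l.length
    · simp only [List.foldl_nil, List.map_nil, List.sum_nil, add_zero]
      rw [List.getD_eq_getElem l 0 h, List.set_getElem_self]
    · simp [List.set_eq_of_length_le (le_of_not_gt h)]
  | cons m ms ih =>
    rw [List.foldl_cons, ih]
    by_cases h : j < l.length
    · rw [List.set_set, getD_set]
      simp [h, add_assoc]
    · have hle := le_of_not_gt h
      simp [List.set_eq_of_length_le hle]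

-- the outer 'for j in range(n)' update loop, pointwise
lemma getD_update_fold (g : Nat → Int) (l0 : List Nat) (hnd : l0.Nodup) :
    ∀ (ps : List Int) (j : Nat),
      ((l0.foldl (fun ps k => if 0 ≤ ps.getD k 0 then ps.set k (ps.getD k 0 + g k) else ps) ps).getD j 0)
        = if j ∈ l0 ∧ j < ps.length then
            (if 0 ≤ ps.getD j 0 then ps.getD j 0 + g j else ps.getD j 0)
          else ps.getD j 0 := by
  induction l0 with
  | nil => intro ps j; simp
  | cons k l ih =>
    intro ps j
    have hndl : l.Nodup := (List.nodup_cons.1 hnd).2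
    have hk : k ∉ l := (List.nodup_cons.1 hnd).1
    rw [List.foldl_cons]
    by_cases hg : 0 ≤ ps.getD k 0
    · rw [if_pos hg, ih hndl, List.length_set]
      by_cases hkj : j = k
      · subst hkj
        have h1 : ¬ (j ∈ l ∧ j < ps.length) := fun h => hk h.1
        rw [if_neg h1, getD_set]
        by_cases hlt : j < ps.length
        · rw [if_pos ⟨rfl, hlt⟩, if_pos ⟨by simp, hlt⟩, if_pos hg]
        · rw [if_neg (fun (h : j = j ∧ j < ps.length) => hlt h.2),
              if_neg (fun (h : j ∈ j :: l ∧ j < ps.length) => hlt h.2)]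
      · have hset : (ps.set k (ps.getD k 0 + g k)).getD j 0 = ps.getD j 0 := by
          rw [getD_set, if_neg (fun (h : k = j ∧ k < ps.length) => hkj h.1.symm)]
        rw [hset]
        have hmem : (j ∈ k :: l) ↔ (j ∈ l) := by simp [hkj]
        simp [hmem]
    · rw [if_neg hg, ih hndl]
      by_cases hkj : j = k
      · subst hkj
        have h1 : ¬ (j ∈ l ∧ j < ps.length) := fun h => hk h.1
        rw [if_neg h1]
        by_cases hlt : j < ps.length
        · rw [if_pos ⟨by simp, hlt⟩, if_neg hg]
        · rw [if_neg (fun (h : j ∈ j :: l ∧ j < ps.length) => hlt h.2)]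
      · have hmem : (j ∈ k :: l) ↔ (j ∈ l) := by simp [hkj]
        simp [hmem]

lemma length_update_fold (g : Nat → Int) (l0 : List Nat) :
    ∀ (ps : List Int),
      (l0.foldl (fun ps k => if 0 ≤ ps.getD k 0 then ps.set k (ps.getD k 0 + g k) else ps) ps).length
        = ps.length := by
  induction l0 with
  | nil => intro ps; rfl
  | cons k l ih =>
    intro ps
    rw [List.foldl_cons, ih]
    split <;> simp

lemma length_foldl_set_neg (ms : List Nat) (l : List Int) :
    (ms.foldl (fun ps m => ps.set m (-1)) l).length = l.length := by
  induction ms generalizing l with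
  | nil => rfl
  | cons m ms ih => rw [List.foldl_cons, ih]; simp

lemma loop_eq (b : List Int) :
    ∀ (fuel i : Nat) (ps pl : List Int) (placed : List Nat),
      pvInv b ps placed →
      processA_loop b fuel i ps pl = processB_loop b fuel i placed pl := by
  intro fuel
  induction fuel with
  | zero => intro i ps pl placed _; rfl
  | succ fuel ih =>
    intro i ps pl placed hInv
    obtain ⟨hlen, hplaced, hps⟩ := hInv
    have hfilter : (List.range b.length).filter (fun j => b.getD j 0 == ps.getD j 0)
        = (List.range b.length).filter
            (fun j => !placed.contains j && (b.getD j 0 == sumDist placed j)) := by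
      apply List.filter_congr
      intro j hj
      have hjn : j < b.length := List.mem_range.1 hj
      by_cases hm : j ∈ placed
      · have hb := (hplaced j hm).2
        have hpsj : ps.getD j 0 = -1 := by rw [hps j hjn]; simp [hm]
        have hc : placed.contains j = true := by simpa using hm
        rw [hpsj, hc]
        simp only [Bool.not_true, Bool.false_and]
        simp only [beq_eq_false_iff_ne, ne_eq]
        omega
      · have hpsj : ps.getD j 0 = sumDist placed j := by rw [hps j hjn]; simp [hm]
        have hc : placed.contains j = false := by simpa using hm
        rw [hpsj, hc]
        simp
    simp only [processA_loop, processB_loop]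
    rw [hfilter]
    set ms := (List.range b.length).filter
        (fun j => !placed.contains j && (b.getD j 0 == sumDist placed j)) with hms
    by_cases hemp : ms.isEmpty
    · simp [hemp]
    · simp only [hemp]
      have hms_lt : ∀ j ∈ ms, j < b.length := by
        intro j hj
        exact List.mem_range.1 (List.mem_filter.1 hj).1
      have hms_cond : ∀ j ∈ ms, j ∉ placed ∧ b.getD j 0 = sumDist placed j := by
        intro j hj
        have h2 := (List.mem_filter.1 hj).2
        simp only [Bool.and_eq_true, Bool.not_eq_true', beq_iff_eq] at h2
        refine ⟨?_, h2.2⟩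
        intro hmem
        have := h2.1
        simp [hmem] at this
      have hnd : ms.Nodup := (List.nodup_range).filter _
      have hps1len : (ms.foldl (fun ps m => ps.set m (-1)) ps).length = b.length := by
        rw [length_foldl_set_neg, hlen]
      have hstep :
          (fun (ps : List Int) (j : Nat) =>
            if 0 ≤ ps.getD j 0 then
              ms.foldl (fun ps m => ps.set j (ps.getD j 0 + pvAbs j m)) ps
            else ps)
          = (fun (ps : List Int) (j : Nat) =>
            if 0 ≤ ps.getD j 0 then
              ps.set j (ps.getD j 0 + (ms.map (pvAbs j)).sum)
            else ps) := by
        funext ps j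
        rw [foldl_set_same]
      apply ih
      refine ⟨?_, ?_, ?_⟩
      · rw [hstep, length_update_fold, hps1len]
      · intro m hm
        rcases List.mem_append.1 hm with h | h
        · exact hplaced m h
        · refine ⟨hms_lt m h, ?_⟩
          rw [(hms_cond m h).2]
          exact sumDist_nonneg _ _
      · intro j hjn
        rw [hstep, getD_update_fold _ _ List.nodup_range]
        have hjlt' : j < (ms.foldl (fun ps m => ps.set m (-1)) ps).length := by
          rw [hps1len]; exact hjn
        rw [if_pos ⟨List.mem_range.2 hjn, hjlt'⟩, getD_foldl_set_neg]
        by_cases hjm : j ∈ ms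
        · have hin : j ∈ ms ∧ j < ps.length := ⟨hjm, by rw [hlen]; exact hjn⟩
          rw [if_pos hin]
          norm_num [List.mem_append, hjm]
        · rw [if_neg (fun h : j ∈ ms ∧ j < ps.length => hjm h.1), hps j hjn]
          by_cases hjp : j ∈ placed
          · rw [if_pos hjp, if_pos (List.mem_append.2 (Or.inl hjp))]
            norm_num
          · rw [if_neg hjp, if_pos (sumDist_nonneg placed j),
                if_neg (show ¬ j ∈ placed ++ ms by simp [hjp, hjm]),
                sumDist_append]

theorem process_equal (b : List Int) : process_array b = process_array_alt b := by
  unfold process_array process_array_alt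
  apply loop_eq
  refine ⟨by simp, by simp, ?_⟩
  intro j hjn
  simp [List.getD_eq_getElem?_getD, hjn, sumDist]

-- ===== VERDICT (by name: the statement is the Claim_ definition above) =====
theorem process_array_spec : Claim_equal_process_array := by
  intro b _
  unfold Spec_process_array
  exact process_equal b
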